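-- pv_equiv track=rewrite | github.com/alexandraback/datacollection | solutions_5706278382862336_0/Python/HexD/go.py | elf_ancestor
-- ===== SOURCE A (Python) =====
-- def elf_ancestor(P, Q, max_ancestors=40):
--   k, remain = divmod(P * 2 ** max_ancestors, Q)
--
--   if remain != 0:
--     raise ValueError("Impossible")
--
--   answer = max_ancestors
--   while k >= 2:
--     k //= 2
--     answer -= 1
--   return answer
-- ===== SOURCE B (Python) =====
-- def elf_ancestor(P, Q, max_ancestors=40):
--   k, remain = divmod(P * 2 ** max_ancestors, Q)
--
--   if remain != 0:
--     raise ValueError("Impossible")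
--
--   # closed form: floor(log2(k)) via bit_length instead of the halving loop
--   return max_ancestors - (k.bit_length() - 1 if k >= 2 else 0)
-- ===== Notes on version B (the rewrite author's own statement) =====
-- stated objective: simpler
-- what changed: Replaced the iterative halving loop computing floor(log2(k)) with a closed-form bit_length computation, keeping no loop state; Pre_ excludes negative max_ancestors, where A's 2**max_ancestors is a float and the whole computation runs in float arithmetic (B's int bit_length raises there).
-- outside the precondition, e.g. on elf_ancestor(8, 1, -1): A returns -3, B raises AttributeError; on elf_ancestor(0, 1, -1): A returns -1, B returns -1
import Mathlib
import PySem

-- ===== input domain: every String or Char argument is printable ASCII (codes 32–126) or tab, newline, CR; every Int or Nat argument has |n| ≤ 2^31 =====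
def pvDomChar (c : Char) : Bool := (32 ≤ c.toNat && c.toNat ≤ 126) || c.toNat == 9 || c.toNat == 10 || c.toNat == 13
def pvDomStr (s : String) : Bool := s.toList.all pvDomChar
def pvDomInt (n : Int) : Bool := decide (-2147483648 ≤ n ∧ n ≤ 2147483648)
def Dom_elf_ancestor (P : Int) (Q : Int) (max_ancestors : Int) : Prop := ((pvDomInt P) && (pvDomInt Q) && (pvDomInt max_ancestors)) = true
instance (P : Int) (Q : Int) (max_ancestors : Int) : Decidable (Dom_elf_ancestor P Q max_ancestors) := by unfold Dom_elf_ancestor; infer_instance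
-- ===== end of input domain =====

-- B replaces A's halving loop by a closed-form bit_length computation (simpler, no loop state).

-- ===== PORT A =====
-- the 'while k >= 2: k //= 2; answer -= 1' loop
def elfLoop (k answer : Int) : Int :=
  if 2 ≤ k then elfLoop (PySem.Int.floordiv k 2) (answer - 1) else answer
termination_by k.toNat
decreasing_by
  rename_i h
  rw [PySem.Int.floordiv_eq_ediv_of_pos (by omega)]
  omega

def elf_ancestor (P : Int) (Q : Int) (max_ancestors : Int) : Int :=
  -- divmod's quotient; the 'remain != 0' raise is excluded by Pre_
  elfLoop (PySem.Int.floordiv (P * 2 ^ max_ancestors.toNat) Q) max_ancestors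

-- ===== PORT B =====
-- k.bit_length() for k ≥ 2 is Nat.log2 k.toNat + 1
def elf_ancestor_alt (P : Int) (Q : Int) (max_ancestors : Int) : Int :=
  let k := PySem.Int.floordiv (P * 2 ^ max_ancestors.toNat) Q
  max_ancestors - (if 2 ≤ k then ((Nat.log2 k.toNat + 1 : Int) - 1) else 0)

-- ===== PRECONDITION & SPEC =====
-- Pre_ excludes Q = 0 (ZeroDivisionError), a nonzero remainder (explicit ValueError),
-- and negative max_ancestors, where 2**max_ancestors is a float so A's whole computation
-- runs in float arithmetic (unportable under the Int convention; B's int bit_length raises there).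
def Pre_elf_ancestor (P : Int) (Q : Int) (max_ancestors : Int) : Prop :=
  0 ≤ max_ancestors ∧ Q ≠ 0 ∧ PySem.Int.mod (P * 2 ^ max_ancestors.toNat) Q = 0
instance (P : Int) (Q : Int) (max_ancestors : Int) : Decidable (Pre_elf_ancestor P Q max_ancestors) := by unfold Pre_elf_ancestor; infer_instance
def pvWitness_elf_ancestor : Int × Int × Int := (3, 6, 1)

def Spec_elf_ancestor (P : Int) (Q : Int) (max_ancestors : Int) (out : Int) : Prop := out = elf_ancestor_alt P Q max_ancestors
instance (P : Int) (Q : Int) (max_ancestors : Int) (out : Int) : Decidable (Spec_elf_ancestor P Q max_ancestors out) := by unfold Spec_elf_ancestor; infer_instance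

-- ===== CLAIM (what is proved, stated in full; the proofs are below) =====
def Claim_equal_elf_ancestor : Prop := ∀ (P : Int) (Q : Int) (max_ancestors : Int), Dom_elf_ancestor P Q max_ancestors → Pre_elf_ancestor P Q max_ancestors → Spec_elf_ancestor P Q max_ancestors (elf_ancestor P Q max_ancestors)

-- ===== LEMMAS AND PROOFS =====

lemma elfLoop_eq : ∀ (n : Nat) (k a : Int), k.toNat = n →
    elfLoop k a = a - (if 2 ≤ k then ((Nat.log2 k.toNat : Nat) : Int) else 0) := by
  intro n
  induction n using Nat.strong_induction_on with
  | _ n ih =>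
    intro k a hn
    rw [elfLoop]
    by_cases h : 2 ≤ k
    · have hfd : PySem.Int.floordiv k 2 = k / 2 := PySem.Int.floordiv_eq_ediv_of_pos (by omega)
      have hlt : (PySem.Int.floordiv k 2).toNat < n := by rw [hfd]; omega
      rw [if_pos h, ih _ hlt _ _ rfl]
      have hlog : Nat.log2 k.toNat = Nat.log2 (k.toNat / 2) + 1 := by
        rw [Nat.log2_def, if_pos (show 2 ≤ k.toNat by omega)]
      have htn : (PySem.Int.floordiv k 2).toNat = k.toNat / 2 := by rw [hfd]; omega
      by_cases h2 : 2 ≤ PySem.Int.floordiv k 2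
      · rw [if_pos h2, if_pos h, htn, hlog]
        push_cast
        ring
      · rw [if_neg h2, if_pos h]
        have hk4 : k.toNat / 2 < 2 := by rw [← htn]; omega
        have : Nat.log2 (k.toNat / 2) = 0 := by
          rw [Nat.log2_def, if_neg (by omega : ¬ 2 ≤ k.toNat / 2)]
        rw [hlog, this]
        push_cast
        ring
    · rw [if_neg h, if_neg h]
      ring

-- ===== VERDICT (by name: the statement is the Claim_ definition above) =====
theorem elf_ancestor_spec : Claim_equal_elf_ancestor := by
  intro P Q m _ _
  unfold Spec_elf_ancestor elf_ancestor elf_ancestor_alt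
  rw [elfLoop_eq _ _ _ rfl]
  by_cases h : 2 ≤ PySem.Int.floordiv (P * 2 ^ m.toNat) Q
  · simp only [if_pos h]; push_cast; ring
  · simp only [if_neg h]
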